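-- pv_equiv track=rewrite | github.com/981377660LMT/algorithm-study | 22_专题/计算偏移量(同余分组)/6226. 摧毁一系列目标.py | destroyTargets
-- ===== SOURCE A (Python) =====
-- from typing import List
-- from collections import defaultdict
--
-- INF = int(1e20)
--
-- def destroyTargets(nums: List[int], space: int) -> int:
--     group = defaultdict(list)
--     for num in nums:
--         group[num % space].append(num)
--     max_, res = 0, INF
--     for g in group.values():
--         if len(g) > max_:
--             max_ = len(g)
--             res = min(g)
--         elif len(g) == max_:
--             res = min(res, min(g))
--     return res
-- ===== SOURCE B (Python) =====
-- INF = int(1e20)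
--
-- def destroyTargets(nums, space):
--     # Sort by remainder so each remainder class becomes one contiguous run,
--     # then scan the runs once, tracking run length and run minimum.
--     arr = sorted(nums, key=lambda n: n % space)
--     best_len, res = 0, INF
--     i, N = 0, len(arr)
--     while i < N:
--         r = arr[i] % space
--         j, lo = i + 1, arr[i]
--         while j < N and arr[j] % space == r:
--             lo = min(lo, arr[j])
--             j += 1
--         if j - i > best_len or (j - i == best_len and lo < res):
--             best_len, res = j - i, lo
--         i = j
--     return res
-- ===== Notes on version B (the rewrite author's own statement) =====
-- stated objective: alternative
-- what changed: A groups members into a remainder-keyed dict and folds a (max-size, running-min) pair over the grouped lists; B never builds a dict: it sorts the list by remainder so each remainder class is one contiguous run, then does a single run-scan tracking run length and run minimum.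
import Mathlib
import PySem

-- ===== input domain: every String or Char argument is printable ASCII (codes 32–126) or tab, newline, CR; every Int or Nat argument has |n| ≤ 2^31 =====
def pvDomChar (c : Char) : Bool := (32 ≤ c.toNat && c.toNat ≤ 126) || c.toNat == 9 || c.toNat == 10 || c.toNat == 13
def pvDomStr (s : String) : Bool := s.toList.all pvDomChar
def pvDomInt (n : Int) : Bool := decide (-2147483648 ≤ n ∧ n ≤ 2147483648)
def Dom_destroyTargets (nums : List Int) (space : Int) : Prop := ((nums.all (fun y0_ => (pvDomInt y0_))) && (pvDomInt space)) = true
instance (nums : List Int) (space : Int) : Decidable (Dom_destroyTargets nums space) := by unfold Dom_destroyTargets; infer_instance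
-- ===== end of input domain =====

-- B replaces A's remainder-keyed dict of member lists (folded with a (max-size, running-min) pair)
-- by a sort-then-scan: sort by remainder so each remainder class is one contiguous run, then a
-- single run-scan tracking run length and run minimum.

def INF : Int := 100000000000000000000

-- ===== PORT A =====
def destroyTargets (nums : List Int) (space : Int) : Int :=
  let group : PySem.Dict Int (List Int) :=
    nums.foldl (fun d num => d.modify (PySem.Int.mod num space) [] (fun g => g ++ [num])) PySem.Dict.empty
  -- every stored group list is nonempty, so Python's min(g) always returns; `(min? g _).getD 0` is exact here
  (group.values.foldl
    (fun st g =>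
      if (g.length : Int) > st.1 then ((g.length : Int), (PySem.List.min? g (fun x => x)).getD 0)
      else if (g.length : Int) = st.1 then (st.1, min st.2 ((PySem.List.min? g (fun x => x)).getD 0))
      else st)
    ((0 : Int), INF)).2

-- ===== PORT B =====
-- inner while loop: consume the run of elements with remainder r, returning
-- (number consumed as j - i, the running minimum lo, the remaining suffix)
def pvTake (space r : Int) : List Int → Int → Int × Int × List Int
  | [], lo => (0, lo, [])
  | x :: t, lo =>
    if PySem.Int.mod x space == r then
      let p := pvTake space r t (min lo x)
      (p.1 + 1, p.2.1, p.2.2)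
    else (0, lo, x :: t)

lemma pvTake_rest_le (space r : Int) : ∀ (t : List Int) (lo : Int),
    (pvTake space r t lo).2.2.length ≤ t.length := by
  intro t
  induction t with
  | nil => intro lo; simp [pvTake]
  | cons x t ih =>
    intro lo
    by_cases h : (PySem.Int.mod x space == r) = true
    · simp only [pvTake, h, if_true]
      exact le_trans (ih (min lo x)) (Nat.le_succ _)
    · simp [pvTake, h]

-- outer while loop over the sorted array (state: best_len, res)
def pvLoop (space : Int) : List Int → Int → Int → Int
  | [], _, res => res
  | x :: t, bestLen, res =>
    let r := PySem.Int.mod x space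
    let p := pvTake space r t x
    if p.1 + 1 > bestLen ∨ (p.1 + 1 = bestLen ∧ p.2.1 < res) then
      pvLoop space p.2.2 (p.1 + 1) p.2.1
    else
      pvLoop space p.2.2 bestLen res
termination_by l => l.length
decreasing_by
  · exact Nat.lt_succ_of_le (pvTake_rest_le space (PySem.Int.mod x space) t x)
  · exact Nat.lt_succ_of_le (pvTake_rest_le space (PySem.Int.mod x space) t x)

def destroyTargets_alt (nums : List Int) (space : Int) : Int :=
  pvLoop space (PySem.List.sorted nums (fun n => PySem.Int.mod n space) false) 0 INF

-- ===== PRECONDITION & SPEC =====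
-- Pre_ excludes only the inputs where Python raises: `num % space` is a ZeroDivisionError
-- when space = 0 and nums is nonempty (with nums = [] the modulo is never evaluated).
def Pre_destroyTargets (nums : List Int) (space : Int) : Prop := nums = [] ∨ space ≠ 0
instance (nums : List Int) (space : Int) : Decidable (Pre_destroyTargets nums space) := by unfold Pre_destroyTargets; infer_instance
def pvWitness_destroyTargets : List Int × Int := ([3, 8, 1, 2], 2)
def Spec_destroyTargets (nums : List Int) (space : Int) (out : Int) : Prop := out = destroyTargets_alt nums space
instance (nums : List Int) (space : Int) (out : Int) : Decidable (Spec_destroyTargets nums space out) := by unfold Spec_destroyTargets; infer_instance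

-- ===== CLAIM (what is proved, stated in full; the proofs are below) =====
def Claim_equal_destroyTargets : Prop := ∀ (nums : List Int) (space : Int), Dom_destroyTargets nums space → Pre_destroyTargets nums space → Spec_destroyTargets nums space (destroyTargets nums space)

-- ===== LEMMAS AND PROOFS =====

-- the group of remainder r, its size as an Int, and its minimum member
def pvGno (nums : List Int) (space r : Int) : List Int :=
  nums.filter (fun n => PySem.Int.mod n space == r)
def pvLen (nums : List Int) (space r : Int) : Int := ((pvGno nums space r).length : Int)
def pvMng (nums : List Int) (space r : Int) : Int :=
  (PySem.List.min? (pvGno nums space r) (fun x => x)).getD 0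

-- the distinct remainders, and the running maximum of group sizes started at `best`
def pvK (nums : List Int) (space : Int) : List Int :=
  PySem.Set.ofList (nums.map (fun n => PySem.Int.mod n space))
def pvMx (nums : List Int) (space best : Int) : Int :=
  (pvK nums space).foldl (fun a r => max a (pvLen nums space r)) best
-- the candidate values the loop state (best, res) can still end in
def pvCand (nums : List Int) (space best res : Int) : List Int :=
  (if pvMx nums space best = best then [res] else [])
    ++ ((pvK nums space).filter (fun r => pvLen nums space r == pvMx nums space best)).map (pvMng nums space)

-- min over a list of Ints with INF as the empty default
def pvF (xs : List Int) : Int := xs.foldr min INF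

lemma pvF_le_INF (xs : List Int) : pvF xs ≤ INF := by
  induction xs with
  | nil => simp [pvF]
  | cons x t ih => simp only [pvF, List.foldr_cons] at *; exact le_trans (min_le_right _ _) ih

lemma pvF_le (xs : List Int) : ∀ x ∈ xs, pvF xs ≤ x := by
  intro x hx
  induction xs with
  | nil => simp at hx
  | cons y t ih =>
    simp only [pvF, List.foldr_cons]
    rcases List.mem_cons.mp hx with h | h
    · subst h; exact min_le_left _ _
    · exact le_trans (min_le_right _ _) (ih h)

lemma le_pvF (c : Int) (xs : List Int) (hc : c ≤ INF) (h : ∀ x ∈ xs, c ≤ x) : c ≤ pvF xs := by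
  induction xs with
  | nil => simpa [pvF] using hc
  | cons y t ih =>
    simp only [pvF, List.foldr_cons]
    exact le_min (h y (List.mem_cons_self)) (ih (fun x hx => h x (List.mem_cons_of_mem _ hx)))

lemma pvF_eq_of_dominates (xs ys : List Int)
    (hxy : ∀ x ∈ xs, ∃ y ∈ ys, y ≤ x) (hyx : ∀ y ∈ ys, ∃ x ∈ xs, x ≤ y) :
    pvF xs = pvF ys := by
  apply le_antisymm
  · exact le_pvF _ _ (pvF_le_INF xs) (fun y hy => by
      obtain ⟨x, hx, hle⟩ := hyx y hy; exact le_trans (pvF_le xs x hx) hle)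
  · exact le_pvF _ _ (pvF_le_INF ys) (fun x hx => by
      obtain ⟨y, hy, hle⟩ := hxy x hx; exact le_trans (pvF_le ys y hy) hle)

lemma mem_pvGno (nums : List Int) (space r n : Int) :
    n ∈ pvGno nums space r ↔ n ∈ nums ∧ PySem.Int.mod n space = r := by
  simp [pvGno, List.mem_filter]

lemma pvMng_mem (nums : List Int) (space r : Int) (h : pvGno nums space r ≠ []) :
    pvMng nums space r ∈ pvGno nums space r := by
  unfold pvMng
  cases e : PySem.List.min? (pvGno nums space r) (fun x => x) with
  | none => exact absurd ((PySem.List.min?_eq_none_iff _ _).mp e) h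
  | some m => simpa using PySem.List.min?_mem e

lemma pvMng_min (nums : List Int) (space r : Int) (h : pvGno nums space r ≠ []) :
    ∀ x ∈ pvGno nums space r, pvMng nums space r ≤ x := by
  unfold pvMng
  cases e : PySem.List.min? (pvGno nums space r) (fun x => x) with
  | none => exact absurd ((PySem.List.min?_eq_none_iff _ _).mp e) h
  | some m => simpa using PySem.List.min?_isMin e

lemma mem_pvK (nums : List Int) (space r : Int) :
    r ∈ pvK nums space ↔ ∃ n ∈ nums, PySem.Int.mod n space = r := by
  rw [pvK, PySem.Set.mem_ofList]
  simp [List.mem_map]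

-- A's grouping dict: lookup is the filtered sublist, keys are the distinct remainders
lemma group_getD (nums : List Int) (space r : Int) :
    (nums.foldl (fun d num => d.modify (PySem.Int.mod num space) [] (fun g => g ++ [num]))
      (PySem.Dict.empty : PySem.Dict Int (List Int))).getD r []
    = pvGno nums space r := by
  have : nums.foldl (fun d num => d.modify (PySem.Int.mod num space) [] (fun g => g ++ [num]))
      (PySem.Dict.empty : PySem.Dict Int (List Int))
      = (nums.map (fun n => (PySem.Int.mod n space, n))).foldl
          (fun d p => d.modify p.1 [] (fun g => g ++ [p.2])) PySem.Dict.empty := by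
    rw [List.foldl_map]
  rw [this, PySem.Dict.getD_foldl_modify_append]
  simp [pvGno, List.filter_map, Function.comp_def]

lemma group_keys (nums : List Int) (space : Int) :
    (nums.foldl (fun d num => d.modify (PySem.Int.mod num space) [] (fun g => g ++ [num]))
      (PySem.Dict.empty : PySem.Dict Int (List Int))).keys
    = pvK nums space := by
  rw [PySem.Dict.keys_foldl_modify_key nums (fun n => PySem.Int.mod n space) []
        (fun _ num => fun g => g ++ [num]) PySem.Dict.empty]
  rfl

lemma group_values (nums : List Int) (space : Int) :
    (nums.foldl (fun d num => d.modify (PySem.Int.mod num space) [] (fun g => g ++ [num]))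
      (PySem.Dict.empty : PySem.Dict Int (List Int))).values
    = (pvK nums space).map (pvGno nums space) := by
  rw [PySem.Dict.values_eq_map_keys _
        (PySem.Dict.nodup_keys_foldl_modify_key nums (fun n => PySem.Int.mod n space) []
          (fun _ num => fun g => g ++ [num]) PySem.Dict.empty (by simp [PySem.Dict.keys_empty])) [],
      group_keys]
  exact List.map_congr_left (fun r _ => group_getD nums space r)

-- A's accumulator loop over the grouped lists, characterised
lemma fold_snd (nums : List Int) (space : Int) :
    ∀ (ks : List Int) (m res : Int),
    (∀ r ∈ ks, pvGno nums space r ≠ []) → (∀ r ∈ ks, pvMng nums space r ≤ INF) → res ≤ INF →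
    ((ks.map (pvGno nums space)).foldl
      (fun st g =>
        if (g.length : Int) > st.1 then ((g.length : Int), (PySem.List.min? g (fun x => x)).getD 0)
        else if (g.length : Int) = st.1 then (st.1, min st.2 ((PySem.List.min? g (fun x => x)).getD 0))
        else st)
      (m, res)).2
    = pvF ((if ks.foldl (fun a r => max a (pvLen nums space r)) m = m then [res] else [])
        ++ (ks.filter (fun r => pvLen nums space r == ks.foldl (fun a r => max a (pvLen nums space r)) m)).map (pvMng nums space)) := by
  intro ks
  induction ks with
  | nil =>
    intro m res _ _ hres
    simp [pvF]
    omega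
  | cons r t ih =>
    intro m res hne hmle hres
    have hne' : ∀ x ∈ t, pvGno nums space x ≠ [] := fun x hx => hne x (List.mem_cons_of_mem _ hx)
    have hmle' : ∀ x ∈ t, pvMng nums space x ≤ INF := fun x hx => hmle x (List.mem_cons_of_mem _ hx)
    have el : ((pvGno nums space r).length : Int) = pvLen nums space r := rfl
    have em : (PySem.List.min? (pvGno nums space r) (fun x => x)).getD 0 = pvMng nums space r := rfl
    simp only [List.map_cons, List.foldl_cons, List.filter_cons, el, em, beq_iff_eq]
    by_cases h1 : m < pvLen nums space r
    · -- strictly larger group: accumulator resets to (len g, min g)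
      have hmax : max m (pvLen nums space r) = pvLen nums space r := by omega
      simp only [hmax]
      rw [if_pos (show pvLen nums space r > m from h1)]
      rw [ih (pvLen nums space r) (pvMng nums space r) hne' hmle' (hmle r List.mem_cons_self)]
      set M := t.foldl (fun a x => max a (pvLen nums space x)) (pvLen nums space r) with hMdef
      have hM : pvLen nums space r ≤ M := (PySem.List.le_foldl_max_int t _ _).1
      rw [if_neg (show ¬ M = m by omega)]
      by_cases h2 : pvLen nums space r = M
      · rw [if_pos h2.symm, if_pos h2]
        simp
      · rw [if_neg (fun h => h2 h.symm), if_neg h2]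
    · by_cases h2 : pvLen nums space r = m
      · -- equal-sized group: res becomes min res (min g)
        have hmax : max m (pvLen nums space r) = m := by omega
        simp only [hmax]
        rw [if_neg (show ¬ pvLen nums space r > m from h1), if_pos h2]
        rw [ih m (min res (pvMng nums space r)) hne' hmle' (le_trans (min_le_left _ _) hres)]
        set M := t.foldl (fun a x => max a (pvLen nums space x)) m with hMdef
        by_cases h3 : M = m
        · rw [if_pos h3, if_pos h3, if_pos (show pvLen nums space r = M by omega)]
          simp only [List.map_cons, pvF, List.cons_append, List.nil_append, List.foldr_cons]
          omega
        · rw [if_neg h3, if_neg h3, if_neg (show ¬ pvLen nums space r = M by omega)]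
      · -- smaller group: state unchanged
        have hmax : max m (pvLen nums space r) = m := by omega
        simp only [hmax]
        rw [if_neg (show ¬ pvLen nums space r > m from h1), if_neg (show ¬ pvLen nums space r = m from h2)]
        rw [ih m res hne' hmle' hres]
        set M := t.foldl (fun a x => max a (pvLen nums space x)) m with hMdef
        have hM : m ≤ M := (PySem.List.le_foldl_max_int t _ _).1
        rw [if_neg (show ¬ pvLen nums space r = M by omega)]

lemma pvGno_ne_nil (nums : List Int) (space n : Int) (hn : n ∈ nums) :
    pvGno nums space (PySem.Int.mod n space) ≠ [] :=
  List.ne_nil_of_mem ((mem_pvGno nums space _ n).mpr ⟨hn, rfl⟩)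

lemma pvLen_pos (nums : List Int) (space r : Int) (h : pvGno nums space r ≠ []) :
    1 ≤ pvLen nums space r := by
  unfold pvLen
  have := List.length_pos_of_ne_nil h
  omega

lemma mem_K_gno (nums : List Int) (space r : Int)
    (hr : r ∈ pvK nums space) :
    pvGno nums space r ≠ [] := by
  obtain ⟨n, hn, hkey⟩ := (mem_pvK nums space r).mp hr
  exact hkey ▸ pvGno_ne_nil nums space n hn

-- A's value, in closed form (nums nonempty, all members ≤ INF)
lemma A_eq (nums : List Int) (space : Int) (hnums : nums ≠ []) (hINF : ∀ n ∈ nums, n ≤ INF) :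
    destroyTargets nums space
    = pvF (((pvK nums space).filter
        (fun r => pvLen nums space r == pvMx nums space 0)).map (pvMng nums space)) := by
  have hz : destroyTargets nums space
      = ((nums.foldl (fun d num => d.modify (PySem.Int.mod num space) [] (fun g => g ++ [num]))
            (PySem.Dict.empty : PySem.Dict Int (List Int))).values.foldl
          (fun st g =>
            if (g.length : Int) > st.1 then ((g.length : Int), (PySem.List.min? g (fun x => x)).getD 0)
            else if (g.length : Int) = st.1 then (st.1, min st.2 ((PySem.List.min? g (fun x => x)).getD 0))
            else st)
          ((0 : Int), INF)).2 := rfl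
  rw [hz, group_values]
  rw [fold_snd nums space (pvK nums space) 0 INF (fun r hr => mem_K_gno nums space r hr)
        (fun r hr => hINF _ ((mem_pvGno nums space r _).mp (pvMng_mem nums space r (mem_K_gno nums space r hr))).1)
        le_rfl]
  have hM0 : ¬ (pvK nums space).foldl (fun a r => max a (pvLen nums space r)) 0 = 0 := by
    obtain ⟨n0, hn0⟩ := List.exists_mem_of_ne_nil nums hnums
    have hkK : PySem.Int.mod n0 space ∈ pvK nums space :=
      (mem_pvK nums space _).mpr ⟨n0, hn0, rfl⟩
    have h1 := pvLen_pos nums space _ (pvGno_ne_nil nums space n0 hn0)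
    have h2 := (PySem.List.le_foldl_max_int (pvK nums space) (pvLen nums space) 0).2 _ hkK
    omega
  rw [if_neg hM0, List.nil_append]
  rfl

-- ===== B-side lemmas =====

-- running-max bounds and attainment
lemma foldl_max_attained (f : Int → Int) : ∀ (l : List Int) (a : Int),
    l.foldl (fun acc x => max acc (f x)) a = a ∨ ∃ x ∈ l, l.foldl (fun acc x => max acc (f x)) a = f x := by
  intro l
  induction l with
  | nil => intro a; left; rfl
  | cons y t ih =>
    intro a
    simp only [List.foldl_cons]
    rcases ih (max a (f y)) with h | ⟨x, hx, hfx⟩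
    · by_cases hy : f y ≤ a
      · left; rw [h]; omega
      · right; exact ⟨y, List.mem_cons_self, by rw [h]; omega⟩
    · right; exact ⟨x, List.mem_cons_of_mem _ hx, hfx⟩

lemma foldl_max_init (f : Int → Int) : ∀ (l : List Int) (a b : Int),
    l.foldl (fun acc x => max acc (f x)) (max a b) = max a (l.foldl (fun acc x => max acc (f x)) b) := by
  intro l
  induction l with
  | nil => intro a b; rfl
  | cons y t ih =>
    intro a b
    simp only [List.foldl_cons]
    rw [show max (max a b) (f y) = max a (max b (f y)) by omega, ih]

lemma pvMx_le (nums : List Int) (space best : Int) :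
    best ≤ pvMx nums space best ∧ ∀ r ∈ pvK nums space, pvLen nums space r ≤ pvMx nums space best :=
  PySem.List.le_foldl_max_int (pvK nums space) (pvLen nums space) best

lemma pvMx_att (nums : List Int) (space best : Int) :
    pvMx nums space best = best ∨ ∃ r ∈ pvK nums space, pvMx nums space best = pvLen nums space r :=
  foldl_max_attained (pvLen nums space) (pvK nums space) best

-- pvTake computes (takeWhile length, takeWhile min-fold, dropWhile)
lemma pvTake_eq (space r : Int) : ∀ (t : List Int) (lo : Int),
    pvTake space r t lo
    = (((t.takeWhile (fun y => PySem.Int.mod y space == r)).length : Int),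
       (t.takeWhile (fun y => PySem.Int.mod y space == r)).foldl min lo,
       t.dropWhile (fun y => PySem.Int.mod y space == r)) := by
  intro t
  induction t with
  | nil => intro lo; simp [pvTake]
  | cons x t ih =>
    intro lo
    by_cases h : (PySem.Int.mod x space == r) = true
    · simp only [pvTake, h, if_true, ih (min lo x), List.takeWhile_cons, List.dropWhile_cons]
      simp
    · simp [pvTake, h]

-- all elements after the dropped run have a strictly larger remainder
lemma dropWhile_gt (space r : Int) : ∀ (t : List Int),
    (∀ y ∈ t, r ≤ PySem.Int.mod y space) →
    t.Pairwise (fun a b => PySem.Int.mod a space ≤ PySem.Int.mod b space) →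
    ∀ z ∈ t.dropWhile (fun y => PySem.Int.mod y space == r), r < PySem.Int.mod z space := by
  intro t
  induction t with
  | nil => intro _ _ z hz; simp at hz
  | cons y t ih =>
    intro hge hpw z hz
    by_cases h : (PySem.Int.mod y space == r) = true
    · rw [List.dropWhile_cons, if_pos h] at hz
      exact ih (fun x hx => hge x (List.mem_cons_of_mem _ hx)) hpw.of_cons z hz
    · rw [List.dropWhile_cons, if_neg (by simpa using h)] at hz
      have hyne : ¬ PySem.Int.mod y space = r := by simpa using h
      have hyge : r ≤ PySem.Int.mod y space := hge y List.mem_cons_self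
      rcases List.mem_cons.mp hz with hzy | hzt
      · subst hzy; omega
      · have := (List.pairwise_cons.mp hpw).1 z hzt
        omega

lemma mem_pvCand (nums : List Int) (space best res v : Int) :
    v ∈ pvCand nums space best res ↔
      (pvMx nums space best = best ∧ v = res) ∨
      ∃ r' ∈ pvK nums space, pvLen nums space r' = pvMx nums space best ∧ v = pvMng nums space r' := by
  unfold pvCand
  rw [List.mem_append]
  constructor
  · rintro (h1 | h2)
    · split_ifs at h1 with hb
      · simp only [List.mem_singleton] at h1
        exact Or.inl ⟨hb, h1⟩
      · simp at h1
    · obtain ⟨r', hr'f, hv⟩ := List.mem_map.mp h2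
      obtain ⟨hr', hlen⟩ := List.mem_filter.mp hr'f
      exact Or.inr ⟨r', hr', by simpa using hlen, hv.symm⟩
  · rintro (⟨hb, rfl⟩ | ⟨r', hr', hlen, rfl⟩)
    · left; rw [if_pos hb]; exact List.mem_singleton.mpr rfl
    · right; exact List.mem_map.mpr ⟨r', List.mem_filter.mpr ⟨hr', by simpa using hlen⟩, rfl⟩

lemma pvMx_max (nums : List Int) (space a b : Int) :
    pvMx nums space (max a b) = max a (pvMx nums space b) :=
  foldl_max_init (pvLen nums space) (pvK nums space) a b

-- the B loop, characterised: on a remainder-sorted list it returns the minimum candidate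
lemma loop_spec (space : Int) : ∀ (N : Nat) (arr : List Int), arr.length ≤ N →
    ∀ (best res : Int),
    arr.Pairwise (fun a b => PySem.Int.mod a space ≤ PySem.Int.mod b space) →
    (∀ n ∈ arr, n ≤ INF) → res ≤ INF →
    pvLoop space arr best res = pvF (pvCand arr space best res) := by
  have hnil : ∀ (best res : Int), res ≤ INF →
      pvLoop space [] best res = pvF (pvCand [] space best res) := by
    intro best res hres
    have hK : pvK ([] : List Int) space = [] := rfl
    have hc : pvCand ([] : List Int) space best res = [res] := by
      rw [pvCand, pvMx, hK]
      simp
    rw [show pvLoop space [] best res = res from by rw [pvLoop], hc]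
    show res = min res INF
    omega
  intro N
  induction N with
  | zero =>
    intro arr harr best res _ _ hres
    have : arr = [] := List.eq_nil_of_length_eq_zero (Nat.le_zero.mp harr)
    subst this
    exact hnil best res hres
  | succ N ih =>
    intro arr harr best res hpw hINF hres
    cases arr with
    | nil => exact hnil best res hres
    | cons x t =>
      -- notation for the run and the rest
      set r := PySem.Int.mod x space with hr
      set run := t.takeWhile (fun y => PySem.Int.mod y space == r) with hrundef
      set d := t.dropWhile (fun y => PySem.Int.mod y space == r) with hddef
      set L : Int := (run.length : Int) + 1 with hLdef
      set lo : Int := run.foldl min x with hlodef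
      have htd : t = run ++ d := (List.takeWhile_append_dropWhile).symm
      have hrun : ∀ y ∈ run, PySem.Int.mod y space = r := by
        intro y hy
        have := List.mem_takeWhile_imp hy
        simpa using this
      have hge : ∀ y ∈ t, r ≤ PySem.Int.mod y space := (List.pairwise_cons.mp hpw).1
      have hpwt : t.Pairwise (fun a b => PySem.Int.mod a space ≤ PySem.Int.mod b space) :=
        (List.pairwise_cons.mp hpw).2
      have hd : ∀ z ∈ d, r < PySem.Int.mod z space := dropWhile_gt space r t hge hpwt
      have hdsub : d.Sublist t := List.dropWhile_sublist _
      have hpwd : d.Pairwise (fun a b => PySem.Int.mod a space ≤ PySem.Int.mod b space) :=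
        hpwt.sublist hdsub
      have hINFd : ∀ n ∈ d, n ≤ INF := fun n hn =>
        hINF n (List.mem_cons_of_mem _ (hdsub.subset hn))
      have hlend : d.length ≤ N := by
        have h1 := hdsub.length_le
        have h2 : t.length ≤ N := by simpa using Nat.succ_le_succ_iff.mp (by simpa using harr)
        omega
      -- group facts
      have hGr : pvGno (x :: t) space r = x :: run := by
        unfold pvGno
        rw [List.filter_cons, if_pos (by simp [hr]), htd, List.filter_append]
        rw [List.filter_eq_self.mpr (fun y hy => by simpa using hrun y hy),
            List.filter_eq_nil_iff.mpr (fun z hz => by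
              have := hd z hz
              simp only [beq_iff_eq]
              omega),
            List.append_nil]
      have hLr : pvLen (x :: t) space r = L := by
        rw [pvLen, hGr]
        simp [hLdef]
      have hMr : pvMng (x :: t) space r = lo := by
        rw [pvMng, hGr, PySem.List.min?_id_cons, Option.getD_some]
      have hGno' : ∀ r', r' ≠ r → pvGno (x :: t) space r' = pvGno d space r' := by
        intro r' hne
        unfold pvGno
        rw [List.filter_cons, if_neg (by simp only [beq_iff_eq]; omega), htd,
            List.filter_append,
            List.filter_eq_nil_iff.mpr (fun y hy => by
              have := hrun y hy
              simp only [beq_iff_eq]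
              omega),
            List.nil_append]
      have hLen' : ∀ r', r' ≠ r → pvLen (x :: t) space r' = pvLen d space r' := by
        intro r' hne; rw [pvLen, hGno' r' hne]; rfl
      have hMng' : ∀ r', r' ≠ r → pvMng (x :: t) space r' = pvMng d space r' := by
        intro r' hne; rw [pvMng, hGno' r' hne]; rfl
      have hrK : r ∈ pvK (x :: t) space :=
        (mem_pvK _ _ _).mpr ⟨x, List.mem_cons_self, rfl⟩
      have hrNd : r ∉ pvK d space := by
        intro h
        obtain ⟨n, hn, hmod⟩ := (mem_pvK _ _ _).mp h
        have := hd n hn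
        omega
      have hKmem : ∀ r'', r'' ∈ pvK (x :: t) space ↔ r'' = r ∨ r'' ∈ pvK d space := by
        intro r''
        constructor
        · intro h
          obtain ⟨n, hn, hmod⟩ := (mem_pvK _ _ _).mp h
          rcases List.mem_cons.mp hn with rfl | hnt
          · exact Or.inl hmod.symm
          · rw [htd] at hnt
            rcases List.mem_append.mp hnt with hnr | hnd
            · exact Or.inl (by rw [← hmod, hrun n hnr])
            · exact Or.inr ((mem_pvK _ _ _).mpr ⟨n, hnd, hmod⟩)
        · rintro (rfl | h)
          · exact hrK
          · obtain ⟨n, hn, hmod⟩ := (mem_pvK _ _ _).mp h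
            exact (mem_pvK _ _ _).mpr ⟨n, List.mem_cons_of_mem _ (hdsub.subset hn), hmod⟩
      -- transfer of a pvK-d key into a candidate of the whole list
      have hne_of_d : ∀ r'', r'' ∈ pvK d space → r'' ≠ r := by
        intro r'' h heq; exact hrNd (heq ▸ h)
      -- the maxima
      have hMleA := pvMx_le (x :: t) space best
      have hMleD := pvMx_le d space best
      have hMx : pvMx (x :: t) space best = max L (pvMx d space best) := by
        apply le_antisymm
        · rcases pvMx_att (x :: t) space best with h | ⟨r'', hr'', h⟩
          · have := hMleD.1; omega
          · rcases (hKmem r'').mp hr'' with rfl | hr''d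
            · rw [h, hLr]; omega
            · rw [h, hLen' r'' (hne_of_d r'' hr''d)]
              have := hMleD.2 r'' hr''d
              omega
        · have h1 : L ≤ pvMx (x :: t) space best := by
            have := hMleA.2 r hrK; omega
          have h2 : pvMx d space best ≤ pvMx (x :: t) space best := by
            rcases pvMx_att d space best with h | ⟨r'', hr'', h⟩
            · rw [h]; exact hMleA.1
            · rw [h, ← hLen' r'' (hne_of_d r'' hr'')]
              exact hMleA.2 r'' ((hKmem r'').mpr (Or.inr hr''))
          omega
      have hMaL : L ≤ pvMx (x :: t) space best := by rw [hMx]; omega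
      -- lo is a member of the whole list, hence ≤ INF
      have hloGno : lo ∈ pvGno (x :: t) space r := by
        rw [← hMr]
        exact pvMng_mem _ _ _ (by rw [hGr]; exact List.cons_ne_nil _ _)
      have hloINF : lo ≤ INF := hINF lo ((mem_pvGno _ _ _ _).mp hloGno).1
      -- one step of the loop
      have hstep : pvLoop space (x :: t) best res
          = if L > best ∨ (L = best ∧ lo < res) then pvLoop space d L lo
            else pvLoop space d best res := by
        rw [pvLoop]
        simp only [pvTake_eq, ← hr, ← hrundef, ← hddef, ← hLdef, ← hlodef]
      rcases lt_trichotomy best L with hcase | hcase | hcase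
      · -- CASE 1: strictly larger run takes over
        have hMd : pvMx d space L = pvMx (x :: t) space best := by
          rw [show L = max L best by omega, pvMx_max, hMx]
        rw [hstep, if_pos (Or.inl hcase), ih d hlend L lo hpwd hINFd hloINF]
        refine (pvF_eq_of_dominates _ _ ?_ ?_).symm
        · intro v hv
          rcases (mem_pvCand _ _ _ _ _).mp hv with ⟨hb, _⟩ | ⟨r'', hr'', hlen, rfl⟩
          · omega
          · rcases (hKmem r'').mp hr'' with rfl | hr''d
            · refine ⟨lo, (mem_pvCand _ _ _ _ _).mpr (Or.inl ⟨by omega, rfl⟩), ?_⟩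
              rw [hMr]
            · refine ⟨pvMng d space r'', (mem_pvCand _ _ _ _ _).mpr
                (Or.inr ⟨r'', hr''d, ?_, rfl⟩), ?_⟩
              · rw [← hLen' r'' (hne_of_d r'' hr''d), hlen, hMd]
              · rw [← hMng' r'' (hne_of_d r'' hr''d)]
        · intro v hv
          rcases (mem_pvCand _ _ _ _ _).mp hv with ⟨hb, rfl⟩ | ⟨r'', hr'', hlen, rfl⟩
          · refine ⟨lo, (mem_pvCand _ _ _ _ _).mpr
              (Or.inr ⟨r, hrK, by rw [hLr]; omega, hMr.symm⟩), le_rfl⟩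
          · refine ⟨pvMng (x :: t) space r'', (mem_pvCand _ _ _ _ _).mpr
              (Or.inr ⟨r'', (hKmem r'').mpr (Or.inr hr''), ?_, rfl⟩), ?_⟩
            · rw [hLen' r'' (hne_of_d r'' hr''), hlen, hMd]
            · rw [hMng' r'' (hne_of_d r'' hr'')]
      · -- CASE 2: equal-sized run, res updated to min res lo
        have hMd2 : pvMx d space best = pvMx (x :: t) space best := by
          rw [hMx]
          have := hMleD.1
          omega
        by_cases hlt : lo < res
        · rw [hstep, if_pos (Or.inr ⟨hcase.symm, hlt⟩), ih d hlend L lo hpwd hINFd hloINF]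
          have hMdL : pvMx d space L = pvMx (x :: t) space best := by
            rw [← hcase, hMd2]
          refine (pvF_eq_of_dominates _ _ ?_ ?_).symm
          · intro v hv
            rcases (mem_pvCand _ _ _ _ _).mp hv with ⟨hb, rfl⟩ | ⟨r'', hr'', hlen, rfl⟩
            · exact ⟨lo, (mem_pvCand _ _ _ _ _).mpr (Or.inl ⟨by omega, rfl⟩), by omega⟩
            · rcases (hKmem r'').mp hr'' with rfl | hr''d
              · refine ⟨lo, (mem_pvCand _ _ _ _ _).mpr (Or.inl ⟨?_, rfl⟩), by rw [hMr]⟩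
                rw [hMdL, ← hlen, hLr]
              · refine ⟨pvMng d space r'', (mem_pvCand _ _ _ _ _).mpr
                  (Or.inr ⟨r'', hr''d, ?_, rfl⟩), ?_⟩
                · rw [← hLen' r'' (hne_of_d r'' hr''d), hlen, hMdL]
                · rw [← hMng' r'' (hne_of_d r'' hr''d)]
          · intro v hv
            rcases (mem_pvCand _ _ _ _ _).mp hv with ⟨hb, rfl⟩ | ⟨r'', hr'', hlen, rfl⟩
            · refine ⟨lo, (mem_pvCand _ _ _ _ _).mpr
                (Or.inr ⟨r, hrK, by rw [hLr, ← hMdL]; omega, hMr.symm⟩), le_rfl⟩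
            · refine ⟨pvMng (x :: t) space r'', (mem_pvCand _ _ _ _ _).mpr
                (Or.inr ⟨r'', (hKmem r'').mpr (Or.inr hr''), ?_, rfl⟩), ?_⟩
              · rw [hLen' r'' (hne_of_d r'' hr''), hlen, hMdL]
              · rw [hMng' r'' (hne_of_d r'' hr'')]
        · rw [hstep, if_neg (by omega), ih d hlend best res hpwd hINFd hres]
          refine (pvF_eq_of_dominates _ _ ?_ ?_).symm
          · intro v hv
            rcases (mem_pvCand _ _ _ _ _).mp hv with ⟨hb, rfl⟩ | ⟨r'', hr'', hlen, rfl⟩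
            · exact ⟨v, (mem_pvCand _ _ _ _ _).mpr (Or.inl ⟨by omega, rfl⟩), le_rfl⟩
            · rcases (hKmem r'').mp hr'' with rfl | hr''d
              · refine ⟨res, (mem_pvCand _ _ _ _ _).mpr (Or.inl ⟨?_, rfl⟩), ?_⟩
                · rw [hMd2, ← hlen, hLr]; omega
                · rw [hMr]; omega
              · refine ⟨pvMng d space r'', (mem_pvCand _ _ _ _ _).mpr
                  (Or.inr ⟨r'', hr''d, ?_, rfl⟩), ?_⟩
                · rw [← hLen' r'' (hne_of_d r'' hr''d), hlen, hMd2]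
                · rw [← hMng' r'' (hne_of_d r'' hr''d)]
          · intro v hv
            rcases (mem_pvCand _ _ _ _ _).mp hv with ⟨hb, rfl⟩ | ⟨r'', hr'', hlen, rfl⟩
            · exact ⟨v, (mem_pvCand _ _ _ _ _).mpr (Or.inl ⟨by omega, rfl⟩), le_rfl⟩
            · refine ⟨pvMng (x :: t) space r'', (mem_pvCand _ _ _ _ _).mpr
                (Or.inr ⟨r'', (hKmem r'').mpr (Or.inr hr''), ?_, rfl⟩), ?_⟩
              · rw [hLen' r'' (hne_of_d r'' hr''), hlen, hMd2]
              · rw [hMng' r'' (hne_of_d r'' hr'')]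
      · -- CASE 3: smaller run, state unchanged
        have hMd3 : pvMx d space best = pvMx (x :: t) space best := by
          rw [hMx]
          have := hMleD.1
          omega
        rw [hstep, if_neg (by omega), ih d hlend best res hpwd hINFd hres]
        refine (pvF_eq_of_dominates _ _ ?_ ?_).symm
        · intro v hv
          rcases (mem_pvCand _ _ _ _ _).mp hv with ⟨hb, rfl⟩ | ⟨r'', hr'', hlen, rfl⟩
          · exact ⟨v, (mem_pvCand _ _ _ _ _).mpr (Or.inl ⟨by omega, rfl⟩), le_rfl⟩
          · rcases (hKmem r'').mp hr'' with rfl | hr''d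
            · exfalso
              rw [hLr] at hlen
              have := hMleA.1
              omega
            · refine ⟨pvMng d space r'', (mem_pvCand _ _ _ _ _).mpr
                (Or.inr ⟨r'', hr''d, ?_, rfl⟩), ?_⟩
              · rw [← hLen' r'' (hne_of_d r'' hr''d), hlen, hMd3]
              · rw [← hMng' r'' (hne_of_d r'' hr''d)]
        · intro v hv
          rcases (mem_pvCand _ _ _ _ _).mp hv with ⟨hb, rfl⟩ | ⟨r'', hr'', hlen, rfl⟩
          · exact ⟨v, (mem_pvCand _ _ _ _ _).mpr (Or.inl ⟨by omega, rfl⟩), le_rfl⟩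
          · refine ⟨pvMng (x :: t) space r'', (mem_pvCand _ _ _ _ _).mpr
              (Or.inr ⟨r'', (hKmem r'').mpr (Or.inr hr''), ?_, rfl⟩), ?_⟩
            · rw [hLen' r'' (hne_of_d r'' hr''), hlen, hMd3]
            · rw [hMng' r'' (hne_of_d r'' hr'')]

-- transfers from the sorted copy back to nums (they are permutations)
lemma main_ne (nums : List Int) (space : Int) (hnums : nums ≠ []) (hINF : ∀ n ∈ nums, n ≤ INF) :
    destroyTargets nums space = destroyTargets_alt nums space := by
  set arr := PySem.List.sorted nums (fun n => PySem.Int.mod n space) false with harr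
  have hperm : arr.Perm nums := PySem.List.sorted_perm nums _ false
  have hpw : arr.Pairwise (fun a b => PySem.Int.mod a space ≤ PySem.Int.mod b space) :=
    PySem.List.sorted_pairwise nums (fun n => PySem.Int.mod n space)
  have hINFa : ∀ n ∈ arr, n ≤ INF := fun n hn => hINF n (hperm.mem_iff.mp hn)
  have hGnoPerm : ∀ r, (pvGno arr space r).Perm (pvGno nums space r) := fun r => hperm.filter _
  have hLenEq : ∀ r, pvLen arr space r = pvLen nums space r := fun r => by
    unfold pvLen; rw [(hGnoPerm r).length_eq]
  have hMngEq : ∀ r, pvMng arr space r = pvMng nums space r := by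
    intro r
    by_cases hnil : pvGno nums space r = []
    · have hnil' : pvGno arr space r = [] := List.Perm.eq_nil (hnil ▸ hGnoPerm r)
      rw [pvMng, pvMng, hnil, hnil']
    · have hnil' : pvGno arr space r ≠ [] := fun h => hnil (List.Perm.eq_nil (h ▸ (hGnoPerm r).symm))
      apply le_antisymm
      · exact pvMng_min arr space r hnil' _ ((hGnoPerm r).mem_iff.mpr (pvMng_mem nums space r hnil))
      · exact pvMng_min nums space r hnil _ ((hGnoPerm r).mem_iff.mp (pvMng_mem arr space r hnil'))
  have hKq : ∀ r, r ∈ pvK arr space ↔ r ∈ pvK nums space := by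
    intro r
    rw [mem_pvK, mem_pvK]
    constructor
    · rintro ⟨n, hn, hm⟩; exact ⟨n, hperm.mem_iff.mp hn, hm⟩
    · rintro ⟨n, hn, hm⟩; exact ⟨n, hperm.mem_iff.mpr hn, hm⟩
  have hMxEq : pvMx arr space 0 = pvMx nums space 0 := by
    apply le_antisymm
    · rcases pvMx_att arr space 0 with h | ⟨r', hr', h⟩
      · rw [h]; exact (pvMx_le nums space 0).1
      · rw [h, hLenEq r']
        exact (pvMx_le nums space 0).2 r' ((hKq r').mp hr')
    · rcases pvMx_att nums space 0 with h | ⟨r', hr', h⟩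
      · rw [h]; exact (pvMx_le arr space 0).1
      · rw [h, ← hLenEq r']
        exact (pvMx_le arr space 0).2 r' ((hKq r').mpr hr')
  have hMxPos : 1 ≤ pvMx nums space 0 := by
    obtain ⟨n0, hn0⟩ := List.exists_mem_of_ne_nil nums hnums
    have hkK : PySem.Int.mod n0 space ∈ pvK nums space :=
      (mem_pvK nums space _).mpr ⟨n0, hn0, rfl⟩
    have h1 := pvLen_pos nums space _ (pvGno_ne_nil nums space n0 hn0)
    have h2 := (pvMx_le nums space 0).2 _ hkK
    omega
  have hB : destroyTargets_alt nums space = pvF (pvCand arr space 0 INF) := by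
    rw [destroyTargets_alt, ← harr]
    exact loop_spec space arr.length arr le_rfl 0 INF hpw hINFa le_rfl
  have hA' : ((pvK nums space).filter
        (fun r => pvLen nums space r == pvMx nums space 0)).map (pvMng nums space)
      = pvCand nums space 0 INF := by
    rw [pvCand, if_neg (by omega), List.nil_append]
  rw [A_eq nums space hnums hINF, hA', hB]
  apply pvF_eq_of_dominates
  · intro v hv
    rcases (mem_pvCand _ _ _ _ _).mp hv with ⟨hb, _⟩ | ⟨r', hr', hlen, rfl⟩
    · omega
    · refine ⟨pvMng arr space r', (mem_pvCand _ _ _ _ _).mpr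
        (Or.inr ⟨r', (hKq r').mpr hr', ?_, rfl⟩), by rw [hMngEq r']⟩
      rw [hLenEq r', hlen, hMxEq]
  · intro v hv
    rcases (mem_pvCand _ _ _ _ _).mp hv with ⟨hb, _⟩ | ⟨r', hr', hlen, rfl⟩
    · rw [hMxEq] at hb; omega
    · refine ⟨pvMng nums space r', (mem_pvCand _ _ _ _ _).mpr
        (Or.inr ⟨r', (hKq r').mp hr', ?_, rfl⟩), by rw [hMngEq r']⟩
      rw [← hLenEq r', hlen, hMxEq]

-- ===== VERDICT (by name: the statement is the Claim_ definition above) =====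
theorem destroyTargets_spec : Claim_equal_destroyTargets := by
  intro nums space hdom hpre
  unfold Spec_destroyTargets
  cases hn : nums with
  | nil =>
    rw [show destroyTargets [] space = INF from rfl, destroyTargets_alt,
        show PySem.List.sorted ([] : List Int) (fun n => PySem.Int.mod n space) false = []
          from rfl, pvLoop]
  | cons n0 ns =>
    have hINF : ∀ n ∈ nums, n ≤ INF := by
      intro n hmem
      have hall : nums.all (fun y => pvDomInt y) = true := by
        unfold Dom_destroyTargets at hdom
        exact (Bool.and_eq_true_iff.mp hdom).1
      have := List.all_eq_true.mp hall n hmem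
      unfold pvDomInt at this
      have h := of_decide_eq_true this
      unfold INF
      omega
    exact hn ▸ main_ne nums space (by rw [hn]; simp) hINF
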